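-- pv_equiv track=rewrite | github.com/torstenyar/supporter | utils/fetch_data.py | count_steps_between
-- ===== SOURCE A (Python) =====
-- def count_steps_between(log_entries, start_id, end_id):
--     # Find all indices for both start_id and end_id
--     start_indices = [i for i, entry in enumerate(log_entries) if entry.get('stepUuid') == start_id]
--     end_indices = [i for i, entry in enumerate(log_entries) if entry.get('stepUuid') == end_id]
--
--     if not start_indices or not end_indices:
--         return 0
--
--     # Use the last occurrence of each ID
--     start_index = start_indices[-1]
--     end_index = end_indices[-1]
--
--     # Ensure start_index comes before end_index
--     if start_index >= end_index:
--         return 0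
--
--     count = sum(1 for entry in log_entries[start_index + 1:end_index] if 'stepUuid' in entry)
--     return count
-- ===== SOURCE B (Python) =====
-- def count_steps_between(log_entries, start_id, end_id):
--     # One forward pass: track last start/end positions and prefix counts of
--     # 'stepUuid'-bearing entries; the answer is a difference of two prefix counts.
--     last_s = last_e = -1
--     s_cnt = e_cnt = cnt = 0
--     for i, entry in enumerate(log_entries):
--         uuid = entry.get('stepUuid')
--         if uuid == start_id:
--             last_s, s_cnt = i, cnt + 1
--         if uuid == end_id:
--             last_e, e_cnt = i, cnt
--         if 'stepUuid' in entry: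
--             cnt += 1
--     if last_s < 0 or last_e < 0 or last_s >= last_e:
--         return 0
--     return e_cnt - s_cnt
-- ===== Notes on version B (the rewrite author's own statement) =====
-- stated objective: alternative
-- what changed: A builds two full index lists, slices the log and re-scans the slice to count; B does a single forward pass keeping the last start/end positions and prefix counts of 'stepUuid'-bearing entries, returning a difference of two prefix counts.
import Mathlib
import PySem

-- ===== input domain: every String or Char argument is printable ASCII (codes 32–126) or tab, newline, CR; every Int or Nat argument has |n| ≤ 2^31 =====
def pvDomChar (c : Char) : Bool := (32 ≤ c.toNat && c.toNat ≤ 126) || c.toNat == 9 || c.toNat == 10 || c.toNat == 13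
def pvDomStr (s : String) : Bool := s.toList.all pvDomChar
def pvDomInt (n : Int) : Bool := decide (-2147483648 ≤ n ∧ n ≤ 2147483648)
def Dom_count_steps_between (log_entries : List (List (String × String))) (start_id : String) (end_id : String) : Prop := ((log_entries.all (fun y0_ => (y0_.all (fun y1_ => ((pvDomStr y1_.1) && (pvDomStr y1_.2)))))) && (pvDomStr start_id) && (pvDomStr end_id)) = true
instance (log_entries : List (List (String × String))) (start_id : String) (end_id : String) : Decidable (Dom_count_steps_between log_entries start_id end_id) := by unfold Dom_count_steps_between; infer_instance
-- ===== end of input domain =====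

-- B replaces A's build-two-index-lists-then-slice-and-recount by a single forward pass
-- keeping last start/end positions and prefix counts (objective: alternative one-pass decomposition).

-- entry.get('stepUuid') (dict = association list, first-match lookup); used by both ports
def getUuid (d : List (String × String)) : Option String := (PySem.Dict.mk d).get? "stepUuid"

-- ===== PORT A =====
def count_steps_between (log_entries : List (List (String × String))) (start_id : String) (end_id : String) : Int :=
  let start_indices := ((PySem.List.enumerate log_entries).filter (fun p => getUuid p.2 == some start_id)).map (·.1)
  let end_indices := ((PySem.List.enumerate log_entries).filter (fun p => getUuid p.2 == some end_id)).map (·.1)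
  if start_indices = [] ∨ end_indices = [] then 0
  else
    -- xs[-1] on a list known nonempty here: getLast?.getD 0 is exact
    let start_index := start_indices.getLast?.getD 0
    let end_index := end_indices.getLast?.getD 0
    if start_index ≥ end_index then 0
    else ((PySem.List.slice log_entries (some (start_index + 1)) (some end_index)).countP (fun d => (getUuid d).isSome) : Int)

-- ===== PORT B =====
-- fold state: (last_s, last_e, s_cnt, e_cnt, cnt)
def bStep (start_id end_id : String) (acc : Int × Int × Int × Int × Int) (p : Int × List (String × String)) : Int × Int × Int × Int × Int :=
  let (ls, le, sc, ec, c) := acc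
  let u := getUuid p.2
  let (ls, sc) := if u == some start_id then (p.1, c + 1) else (ls, sc)
  let (le, ec) := if u == some end_id then (p.1, c) else (le, ec)
  let c := if u.isSome then c + 1 else c
  (ls, le, sc, ec, c)

def count_steps_between_alt (log_entries : List (List (String × String))) (start_id : String) (end_id : String) : Int :=
  let st := (PySem.List.enumerate log_entries).foldl (bStep start_id end_id) (-1, -1, 0, 0, 0)
  if st.1 < 0 ∨ st.2.1 < 0 ∨ st.1 ≥ st.2.1 then 0 else st.2.2.2.1 - st.2.2.1

-- ===== PRECONDITION & SPEC =====
def Spec_count_steps_between (log_entries : List (List (String × String))) (start_id : String) (end_id : String) (out : Int) : Prop := out = count_steps_between_alt log_entries start_id end_id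
instance (log_entries : List (List (String × String))) (start_id : String) (end_id : String) (out : Int) : Decidable (Spec_count_steps_between log_entries start_id end_id out) := by unfold Spec_count_steps_between; infer_instance

-- ===== CLAIM (what is proved, stated in full; the proofs are below) =====
def Claim_equal_count_steps_between : Prop := ∀ (log_entries : List (List (String × String))) (start_id : String) (end_id : String), Dom_count_steps_between log_entries start_id end_id → Spec_count_steps_between log_entries start_id end_id (count_steps_between log_entries start_id end_id)

-- ===== LEMMAS AND PROOFS =====

-- number of 'stepUuid'-bearing entries
def cntK (l : List (List (String × String))) : Nat := l.countP (fun d => (getUuid d).isSome)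

-- last index matched by p, as A computes it
def lastIdx (p : List (String × String) → Bool) (l : List (List (String × String))) : Option Int :=
  (((PySem.List.enumerate l).filter (fun q => p q.2)).map (·.1)).getLast?

def sTest (start_id : String) (d : List (String × String)) : Bool := getUuid d == some start_id

-- the characterization of B's fold state
def bState (start_id end_id : String) (l : List (List (String × String))) : Int × Int × Int × Int × Int :=
  ((lastIdx (sTest start_id) l).getD (-1),
   (lastIdx (sTest end_id) l).getD (-1),
   (match lastIdx (sTest start_id) l with | some i => (cntK (l.take (i.toNat + 1)) : Int) | none => 0),
   (match lastIdx (sTest end_id) l with | some i => (cntK (l.take i.toNat) : Int) | none => 0),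
   (cntK l : Int))

lemma lastIdx_append (p : List (String × String) → Bool) (l : List (List (String × String))) (x : List (String × String)) :
    lastIdx p (l ++ [x]) = if p x then some (l.length : Int) else lastIdx p l := by
  unfold lastIdx
  rw [PySem.List.enumerate_append]
  simp only [PySem.List.enumerate_cons, PySem.List.enumerate_nil, List.filter_append, List.map_append]
  by_cases hp : p x
  · simp [hp]
  · simp [hp]

lemma lastIdx_bounds (p : List (String × String) → Bool) (l : List (List (String × String))) (i : Int)
    (h : lastIdx p l = some i) : 0 ≤ i ∧ i < l.length := by
  unfold lastIdx at h
  have hm := List.mem_of_getLast? h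
  simp only [List.mem_map, List.mem_filter] at hm
  obtain ⟨q, ⟨hq, _⟩, rfl⟩ := hm
  rw [PySem.List.mem_enumerate_iff] at hq
  obtain ⟨k, hk, rfl⟩ := hq
  simp; omega

lemma fold_char (start_id end_id : String) (l : List (List (String × String))) :
    (PySem.List.enumerate l).foldl (bStep start_id end_id) (-1, -1, 0, 0, 0) = bState start_id end_id l := by
  induction l using List.reverseRecOn with
  | nil => rfl
  | append_singleton l x ih =>
    rw [PySem.List.enumerate_append]
    simp only [PySem.List.enumerate_cons, PySem.List.enumerate_nil, List.foldl_append,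
      List.foldl_cons, List.foldl_nil, ih, zero_add]
    have hcnt : cntK (l ++ [x]) = cntK l + (if (getUuid x).isSome then 1 else 0) := by
      cases hK : (getUuid x).isSome <;>
        simp [cntK, List.countP_append, hK]
    unfold bState bStep
    rw [lastIdx_append, lastIdx_append]
    dsimp only [sTest]
    by_cases hS : (getUuid x == some start_id) = true <;> by_cases hE : (getUuid x == some end_id) = true
    · -- both match
      have hsome : (getUuid x).isSome = true := by
        rw [beq_iff_eq] at hS; rw [hS]; rfl
      simp only [if_pos hS, if_pos hE]
      simp only [Prod.mk.injEq]
      refine ⟨by simp, by simp, ?_, ?_, ?_⟩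
      · rw [Int.toNat_natCast, List.take_of_length_le (by simp), hcnt, if_pos hsome]
        push_cast; ring
      · rw [Int.toNat_natCast, List.take_left]
      · rw [hcnt, if_pos hsome, if_pos hsome]; push_cast; ring
    · -- only start matches
      have hsome : (getUuid x).isSome = true := by
        rw [beq_iff_eq] at hS; rw [hS]; rfl
      simp only [if_pos hS, if_neg hE]
      simp only [Prod.mk.injEq]
      refine ⟨by simp, by simp, ?_, ?_, ?_⟩
      · rw [Int.toNat_natCast, List.take_of_length_le (by simp), hcnt, if_pos hsome]
        push_cast; ring
      · cases he : lastIdx (sTest end_id) l with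
        | none => rfl
        | some j =>
          have hb := lastIdx_bounds _ _ _ he
          dsimp only
          rw [List.take_append_of_le_length (by omega)]
      · rw [hcnt, if_pos hsome, if_pos hsome]; push_cast; ring
    · -- only end matches
      have hsome : (getUuid x).isSome = true := by
        rw [beq_iff_eq] at hE; rw [hE]; rfl
      simp only [if_neg hS, if_pos hE]
      simp only [Prod.mk.injEq]
      refine ⟨by simp, by simp, ?_, ?_, ?_⟩
      · cases hs : lastIdx (sTest start_id) l with
        | none => rfl
        | some i =>
          have hb := lastIdx_bounds _ _ _ hs
          dsimp only
          rw [List.take_append_of_le_length (by omega)]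
      · rw [Int.toNat_natCast, List.take_left]
      · rw [hcnt, if_pos hsome, if_pos hsome]; push_cast; ring
    · -- neither matches
      simp only [if_neg hS, if_neg hE]
      simp only [Prod.mk.injEq]
      refine ⟨by simp, by simp, ?_, ?_, ?_⟩
      · cases hs : lastIdx (sTest start_id) l with
        | none => rfl
        | some i =>
          have hb := lastIdx_bounds _ _ _ hs
          dsimp only
          rw [List.take_append_of_le_length (by omega)]
      · cases he : lastIdx (sTest end_id) l with
        | none => rfl
        | some j =>
          have hb := lastIdx_bounds _ _ _ he
          dsimp only
          rw [List.take_append_of_le_length (by omega)]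
      · rw [hcnt]
        cases hK : (getUuid x).isSome <;> simp

lemma countP_slice (l : List (List (String × String))) (a b : Nat) (hab : a ≤ b) :
    (((l.drop a).take (b - a)).countP (fun d => (getUuid d).isSome) : Int) = (cntK (l.take b) : Int) - (cntK (l.take a) : Int) := by
  have h1 : (l.drop a).take (b - a) = (l.take b).drop a := by
    rw [List.drop_take]
  have hsplit : l.take a ++ (l.take b).drop a = l.take b := by
    have h := List.take_append_drop a (l.take b)
    rwa [List.take_take, min_eq_left hab] at h
  have key : cntK (l.take b) = cntK (l.take a) + ((l.take b).drop a).countP (fun d => (getUuid d).isSome) := by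
    unfold cntK
    conv_lhs => rw [← hsplit]
    rw [List.countP_append]
  rw [h1, key]
  push_cast; ring

theorem count_steps_between_spec : Claim_equal_count_steps_between := by
  intro l start_id end_id _
  unfold Spec_count_steps_between count_steps_between count_steps_between_alt
  rw [fold_char]
  have hSidx : (((PySem.List.enumerate l).filter (fun p => getUuid p.2 == some start_id)).map (·.1)).getLast? = lastIdx (sTest start_id) l := rfl
  have hEidx : (((PySem.List.enumerate l).filter (fun p => getUuid p.2 == some end_id)).map (·.1)).getLast? = lastIdx (sTest end_id) l := rfl
  unfold bState
  cases hs : lastIdx (sTest start_id) l with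
  | none =>
    have hnil : (((PySem.List.enumerate l).filter (fun p => getUuid p.2 == some start_id)).map (·.1)) = [] := by
      rw [← List.getLast?_eq_none_iff, hSidx, hs]
    simp [hnil]
  | some i =>
    have hlast : (((PySem.List.enumerate l).filter (fun p => getUuid p.2 == some start_id)).map (·.1)).getLast? = some i := hSidx.trans hs
    have hine : (((PySem.List.enumerate l).filter (fun p => getUuid p.2 == some start_id)).map (·.1)) ≠ [] := by
      intro hc; rw [hc] at hlast; simp at hlast
    have hbi := lastIdx_bounds _ _ _ hs
    cases he : lastIdx (sTest end_id) l with
    | none =>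
      have hnil : (((PySem.List.enumerate l).filter (fun p => getUuid p.2 == some end_id)).map (·.1)) = [] := by
        rw [← List.getLast?_eq_none_iff, hEidx, he]
      simp [hnil]
    | some j =>
      have hlastE : (((PySem.List.enumerate l).filter (fun p => getUuid p.2 == some end_id)).map (·.1)).getLast? = some j := hEidx.trans he
      have hjne : (((PySem.List.enumerate l).filter (fun p => getUuid p.2 == some end_id)).map (·.1)) ≠ [] := by
        intro hc; rw [hc] at hlastE; simp at hlastE
      have hbj := lastIdx_bounds _ _ _ he
      simp only [hine, hjne, or_self, if_false, hlast, hlastE, Option.getD_some]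
      by_cases hij : i ≥ j
      · rw [if_pos hij, if_pos (by omega : i < 0 ∨ j < 0 ∨ i ≥ j)]
      · rw [if_neg hij, if_neg (by omega : ¬ (i < 0 ∨ j < 0 ∨ i ≥ j))]
        rw [show PySem.List.slice l (some (i + 1)) (some j)
              = (l.drop (i + 1).toNat).take (j.toNat - (i + 1).toNat) from
            PySem.List.slice_toNat l (by omega) (by omega)]
        have h1 : (i + 1).toNat = i.toNat + 1 := by omega
        rw [h1, countP_slice l (i.toNat + 1) j.toNat (by omega)]
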